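-- pv_equiv track=rewrite | github.com/NicolasNunezLira/DataScienceUDD | 1. Fundamentos_de_Python/Archivos/my_lib.py | eliminar_puntuacion
-- ===== SOURCE A (Python) =====
-- def eliminar_puntuacion(texto :str) -> list[str]:
--   """
--   Función que elimina la puntuación de un texto, considerado que la puntuación
--   como los simbolos:
--         ¡!\""#$%&\'()*+,-./:;<=>¿?@[\\]^_`{|}~
--
--   Argumentos:
--   texto (str): Cadena de caracteres de la cual se desea eliminar la puntuación
--
--   Retorna:
--   list[str]: Lista con todas las palabras del texto, en el orden original, pero
--               sin puntuación.
--   """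
--   puntuacion = '¡!\""#$%&\'()*+,-./:;<=>¿?@[\\]^_`{|}~'
--
--   texto = texto.split(' ')
--   lista = []
--
--   for word in texto:
--     for palabra in word.split('\n'):
--       aux = ''.join([letter for letter in palabra if letter not in puntuacion])
--       if aux != '':
--         lista.append(aux)
--
--   return lista
-- ===== SOURCE B (Python) =====
-- def eliminar_puntuacion(texto: str) -> list[str]:
--     """Single-pass tokenizer: scan the text once, treating ' ' and '\n' as
--     separators, skipping punctuation characters, accumulating a buffer."""
--     puntuacion = '¡!\""#$%&\'()*+,-./:;<=>¿?@[\\]^_`{|}~'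
--     lista = []
--     buffer = ''
--     for c in texto:
--         if c == ' ' or c == '\n':
--             if buffer:
--                 lista.append(buffer)
--             buffer = ''
--         elif c in puntuacion:
--             continue
--         else:
--             buffer += c
--     if buffer:
--         lista.append(buffer)
--     return lista
-- ===== Notes on version B (the rewrite author's own statement) =====
-- stated objective: simpler
-- what changed: Replaces the two nested split calls plus a per-word filtering join-comprehension with a single incremental pass over the characters that maintains one buffer, flushed at separator characters (space and newline) while punctuation is skipped.
import Mathlib
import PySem

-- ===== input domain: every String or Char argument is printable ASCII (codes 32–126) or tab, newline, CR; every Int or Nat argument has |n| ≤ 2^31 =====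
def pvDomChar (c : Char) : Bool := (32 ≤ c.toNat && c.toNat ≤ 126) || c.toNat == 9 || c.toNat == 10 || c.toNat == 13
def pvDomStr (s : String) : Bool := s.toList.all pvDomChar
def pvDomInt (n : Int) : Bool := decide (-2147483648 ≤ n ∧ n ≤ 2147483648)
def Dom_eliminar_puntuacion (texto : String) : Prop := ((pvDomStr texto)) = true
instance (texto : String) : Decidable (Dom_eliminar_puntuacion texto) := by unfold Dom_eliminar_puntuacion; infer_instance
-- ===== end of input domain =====

-- B replaces A's two nested split calls plus per-word filtering comprehension by a single
-- incremental pass over the characters with one buffer (objective: simpler decomposition).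

-- the punctuation literal of both Pythons (the doubled '"' kept; membership is unaffected)
def pvPunct : List Char := "¡!\"\"#$%&'()*+,-./:;<=>¿?@[\\]^_`{|}~".toList

-- ===== PORT A =====
-- ''.join([letter for letter in palabra if letter not in puntuacion]) is ported as
-- String.mk of the filtered character list (exact: joining single characters).
def eliminar_puntuacion (texto : String) : List String :=
  let puntuacion := pvPunct
  let texto2 := PySem.Chars.splitOn texto.toList [' ']
  let lista : List String := []
  texto2.foldl (fun lista word =>
    (PySem.Chars.splitOn word ['\n']).foldl (fun lista palabra =>
      let aux := palabra.filter (fun letter => !(puntuacion.contains letter))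
      if aux ≠ [] then lista ++ [String.mk aux] else lista) lista) lista

-- ===== PORT B =====
-- one step of Source B's loop body: flush the buffer at ' '/'\n', skip punctuation, else extend it
def pvStepB (st : List String × List Char) (c : Char) : List String × List Char :=
  if c = ' ' ∨ c = '\n' then
    (if st.2 ≠ [] then st.1 ++ [String.mk st.2] else st.1, [])
  else if pvPunct.contains c then st
  else (st.1, st.2 ++ [c])

def eliminar_puntuacion_alt (texto : String) : List String :=
  let fin := texto.toList.foldl pvStepB ([], [])
  if fin.2 ≠ [] then fin.1 ++ [String.mk fin.2] else fin.1

-- ===== PRECONDITION & SPEC =====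
def Spec_eliminar_puntuacion (texto : String) (out : List String) : Prop := out = eliminar_puntuacion_alt texto
instance (texto : String) (out : List String) : Decidable (Spec_eliminar_puntuacion texto out) := by unfold Spec_eliminar_puntuacion; infer_instance

-- ===== CLAIM (what is proved, stated in full; the proofs are below) =====
def Claim_equal_eliminar_puntuacion : Prop := ∀ (texto : String), Dom_eliminar_puntuacion texto → Spec_eliminar_puntuacion texto (eliminar_puntuacion texto)

-- ===== LEMMAS AND PROOFS =====

-- a structural model of Python's str.split with a one-character separator
def pvSplit (P : Char → Bool) : List Char → List Char → List (List Char)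
  | [], cur => [cur.reverse]
  | c :: l, cur => if P c then cur.reverse :: pvSplit P l [] else pvSplit P l (c :: cur)

def pvFlush (buf : List Char) : List String := if buf ≠ [] then [String.mk buf] else []

-- reference tokenizer (B's recursion, written structurally)
def pvTok : List Char → List Char → List String
  | [], buf => pvFlush buf
  | c :: l, buf =>
    if c = ' ' ∨ c = '\n' then pvFlush buf ++ pvTok l []
    else if pvPunct.contains c then pvTok l buf
    else pvTok l (buf ++ [c])

-- A's per-word action: filter out punctuation, keep the word if non-empty
def pvFlush2 (p : List Char) : List String :=
  pvFlush (p.filter (fun c => !(pvPunct.contains c)))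

theorem pvGo_spec (c : Char) :
    ∀ (fuel : Nat) (l cur : List Char) (acc : List (List Char)), l.length ≤ fuel →
      PySem.Chars.splitOn.go [c] fuel l cur acc = acc.reverse ++ pvSplit (· == c) l cur := by
  intro fuel
  induction fuel with
  | zero =>
    intro l cur acc h
    have : l = [] := by cases l <;> simp_all
    subst this
    simp [PySem.Chars.splitOn.go, pvSplit]
  | succ n ih =>
    intro l cur acc h
    cases l with
    | nil => simp [PySem.Chars.splitOn.go, pvSplit]
    | cons a rest =>
      rw [PySem.Chars.splitOn.go]
      by_cases hac : a = c
      · subst hac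
        simp only [List.length_cons] at h
        simp only [List.isPrefixOf, BEq.rfl, List.isPrefixOf_nil_left, Bool.and_self,
          if_true, List.length_cons, List.length_nil, List.drop_succ_cons, List.drop_zero]
        rw [ih rest [] (cur.reverse :: acc) (by omega)]
        simp [pvSplit]
      · have hpre : [c].isPrefixOf (a :: rest) = false := by
          simp [List.isPrefixOf]; exact fun h' => hac h'.symm
        rw [hpre]
        simp only [Bool.false_eq_true, if_false]
        simp only [List.length_cons] at h
        rw [ih rest (a :: cur) acc (by omega)]
        simp [pvSplit, hac]

theorem pvSplitOn_single (l : List Char) (c : Char) :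
    PySem.Chars.splitOn l [c] = pvSplit (· == c) l [] := by
  rw [PySem.Chars.splitOn]
  simpa using pvGo_spec c (l.length + 1) l [] [] (by omega)

-- prepending pending characters to a split only changes its first piece
theorem pvSplit_prepend (P : Char → Bool) :
    ∀ (l cur : List Char), ∃ h t, pvSplit P l [] = h :: t ∧ pvSplit P l cur = (cur.reverse ++ h) :: t := by
  intro l
  induction l with
  | nil => intro cur; exact ⟨[], [], by simp [pvSplit], by simp [pvSplit]⟩
  | cons a rest ih =>
    intro cur
    by_cases hP : P a = true
    · exact ⟨[], pvSplit P rest [], by simp [pvSplit, hP], by simp [pvSplit, hP]⟩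
    · obtain ⟨h, t, h1, h2⟩ := ih [a]
      obtain ⟨h', t', h1', h2'⟩ := ih (a :: cur)
      rw [h1] at h1'
      injection h1' with e1 e2
      subst e1; subst e2
      refine ⟨a :: h, t, ?_, ?_⟩
      · rw [show pvSplit P (a :: rest) [] = pvSplit P rest [a] by simp [pvSplit, hP], h2]
        simp
      · rw [show pvSplit P (a :: rest) cur = pvSplit P rest (a :: cur) by simp [pvSplit, hP], h2']
        simp

-- composing the two single-character splits gives the split on both separators
theorem pvSplit_compose :
    ∀ (l : List Char),
      List.flatMap (fun w => pvSplit (· == '\n') w []) (pvSplit (· == ' ') l []) =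
        pvSplit (fun c => c == ' ' || c == '\n') l [] := by
  intro l
  induction l with
  | nil => simp [pvSplit]
  | cons a rest ih =>
    by_cases hsp : a = ' '
    · subst hsp
      have e1 : pvSplit (· == ' ') (' ' :: rest) [] = [] :: pvSplit (· == ' ') rest [] := by
        simp [pvSplit]
      have e2 : pvSplit (fun c => c == ' ' || c == '\n') (' ' :: rest) [] =
          [] :: pvSplit (fun c => c == ' ' || c == '\n') rest [] := by simp [pvSplit]
      rw [e1, e2, List.flatMap_cons, ih]
      simp [pvSplit]
    · by_cases hnl : a = '\n'
      · subst hnl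
        obtain ⟨h, t, h1, h2⟩ := pvSplit_prepend (· == ' ') rest ['\n']
        have e1 : pvSplit (· == ' ') ('\n' :: rest) [] = ('\n' :: h) :: t := by
          rw [show pvSplit (· == ' ') ('\n' :: rest) [] = pvSplit (· == ' ') rest ['\n'] by
            simp [pvSplit], h2]
          simp
        have e2 : pvSplit (fun c => c == ' ' || c == '\n') ('\n' :: rest) [] =
            [] :: pvSplit (fun c => c == ' ' || c == '\n') rest [] := by simp [pvSplit]
        have e3 : pvSplit (· == '\n') ('\n' :: h) [] = [] :: pvSplit (· == '\n') h [] := by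
          simp [pvSplit]
        rw [e1, e2, List.flatMap_cons, e3]
        rw [h1, List.flatMap_cons] at ih
        simpa using ih
      · obtain ⟨h, t, h1, h2⟩ := pvSplit_prepend (· == ' ') rest [a]
        obtain ⟨h', t', h1', h2'⟩ := pvSplit_prepend (fun c => c == ' ' || c == '\n') rest [a]
        obtain ⟨hh, tt, hh1, hh2⟩ := pvSplit_prepend (· == '\n') h [a]
        have e1 : pvSplit (· == ' ') (a :: rest) [] = (a :: h) :: t := by
          rw [show pvSplit (· == ' ') (a :: rest) [] = pvSplit (· == ' ') rest [a] by
            simp [pvSplit, hsp], h2]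
          simp
        have e2 : pvSplit (fun c => c == ' ' || c == '\n') (a :: rest) [] = (a :: h') :: t' := by
          rw [show pvSplit (fun c => c == ' ' || c == '\n') (a :: rest) [] =
              pvSplit (fun c => c == ' ' || c == '\n') rest [a] by simp [pvSplit, hsp, hnl], h2']
          simp
        have e3 : pvSplit (· == '\n') (a :: h) [] = (a :: hh) :: tt := by
          rw [show pvSplit (· == '\n') (a :: h) [] = pvSplit (· == '\n') h [a] by
            simp [pvSplit, hnl], hh2]
          simp
        rw [e1, e2, List.flatMap_cons, e3]
        rw [h1, List.flatMap_cons, hh1, h1'] at ih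
        simp only [List.cons_append] at ih ⊢
        injection ih with ea eb
        simp [ea, eb]

-- A's filtered split equals the tokenizer (generalised over non-separator pending chars)
theorem pvMain (l : List Char) :
    ∀ (buf : List Char), (∀ c ∈ buf, (c = ' ' ∨ c = '\n') → False) →
      List.flatMap pvFlush2 (pvSplit (fun c => c == ' ' || c == '\n') l buf.reverse) =
        pvTok l (buf.filter (fun c => !(pvPunct.contains c))) := by
  induction l with
  | nil =>
    intro buf hbuf
    simp [pvSplit, pvTok, pvFlush2]
  | cons a rest ih =>
    intro buf hbuf
    by_cases hsep : a = ' ' ∨ a = '\n'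
    · have hb : (fun c => c == ' ' || c == '\n') a = true := by
        rcases hsep with h | h <;> simp [h]
      rw [show pvSplit (fun c => c == ' ' || c == '\n') (a :: rest) buf.reverse =
            buf.reverse.reverse :: pvSplit (fun c => c == ' ' || c == '\n') rest [] by
          simp [pvSplit, hb]]
      have hrest := ih [] (by simp)
      simp only [List.reverse_nil, List.filter_nil] at hrest
      simp only [List.reverse_reverse, List.flatMap_cons]
      rw [hrest]
      simp [pvTok, hsep, pvFlush2]
    · have hb : (fun c => c == ' ' || c == '\n') a = false := by
        push_neg at hsep; simp [hsep.1, hsep.2]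
      have hbuf' : ∀ c ∈ buf ++ [a], (c = ' ' ∨ c = '\n') → False := by
        intro c hc
        rcases List.mem_append.mp hc with h | h
        · exact hbuf c h
        · simp at h; subst h; exact fun h' => hsep h'
      simp only [pvSplit, hb, Bool.false_eq_true, if_false]
      rw [show (a :: buf.reverse) = (buf ++ [a]).reverse by simp]
      rw [ih (buf ++ [a]) hbuf']
      by_cases hpc : a ∈ pvPunct
      · simp [pvTok, hsep, hpc, List.filter_append]
      · simp [pvTok, hsep, hpc, List.filter_append]

-- B's fold with final flush equals the tokenizer
theorem pvB_fold (l : List Char) :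
    ∀ (res : List String) (buf : List Char),
      (let fin := l.foldl pvStepB (res, buf);
       if fin.2 ≠ [] then fin.1 ++ [String.mk fin.2] else fin.1) = res ++ pvTok l buf := by
  induction l with
  | nil =>
    intro res buf
    by_cases h : buf = [] <;> simp [pvTok, pvFlush, h]
  | cons a rest ih =>
    intro res buf
    simp only [List.foldl_cons]
    by_cases hsep : a = ' ' ∨ a = '\n'
    · rw [show pvStepB (res, buf) a =
          (if buf ≠ [] then res ++ [String.mk buf] else res, []) by simp [pvStepB, hsep]]
      rw [ih]
      by_cases h : buf = [] <;> simp [pvTok, pvFlush, hsep, h]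
    · by_cases hpc : a ∈ pvPunct
      · rw [show pvStepB (res, buf) a = (res, buf) by
            simp [pvStepB, hsep, List.contains_iff_mem, hpc]]
        rw [ih]
        simp [pvTok, hsep, hpc]
      · rw [show pvStepB (res, buf) a = (res, buf ++ [a]) by
            simp [pvStepB, hsep, List.contains_iff_mem, hpc]]
        rw [ih]
        simp [pvTok, hsep, hpc]

-- A's inner fold appends the filtered non-empty words
theorem pvInner_fold (L : List (List Char)) :
    ∀ (acc : List String),
      L.foldl (fun lista palabra =>
        let aux := palabra.filter (fun letter => !(pvPunct.contains letter))
        if aux ≠ [] then lista ++ [String.mk aux] else lista) acc = acc ++ L.flatMap pvFlush2 := by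
  induction L with
  | nil => intro acc; simp
  | cons p L ih =>
    intro acc
    simp only [List.foldl_cons, List.flatMap_cons]
    rw [ih]
    by_cases h : p.filter (fun c => !(pvPunct.contains c)) = [] <;>
      simp_all [pvFlush2, pvFlush]

theorem pvOuter_fold (W : List (List Char)) :
    ∀ (acc : List String),
      W.foldl (fun lista word =>
        (PySem.Chars.splitOn word ['\n']).foldl (fun lista palabra =>
          let aux := palabra.filter (fun letter => !(pvPunct.contains letter))
          if aux ≠ [] then lista ++ [String.mk aux] else lista) lista) acc =
      acc ++ W.flatMap (fun w => (PySem.Chars.splitOn w ['\n']).flatMap pvFlush2) := by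
  induction W with
  | nil => intro acc; simp
  | cons w W ih =>
    intro acc
    simp only [List.foldl_cons, List.flatMap_cons]
    rw [pvInner_fold, ih, List.append_assoc]

-- ===== VERDICT (by name: the statement is the Claim_ definition above) =====
theorem eliminar_puntuacion_spec : Claim_equal_eliminar_puntuacion := by
  intro texto _
  unfold Spec_eliminar_puntuacion eliminar_puntuacion eliminar_puntuacion_alt
  rw [pvOuter_fold, pvB_fold]
  simp only [List.nil_append]
  simp only [pvSplitOn_single]
  rw [← List.flatMap_assoc]
  rw [pvSplit_compose]
  have := pvMain (texto.toList) [] (by simp)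
  simpa using this
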